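-- pv_equiv track=rewrite | github.com/yuelyxia/tribots | teto++/teto++.py | sort_server_tags
-- ===== SOURCE A (Python) =====
-- red_server_tags = ["Scam Server", "Impersonator Server", "Fake Vouch Server", "Fake Event Server"]
--
-- def sort_server_tags(tags):
--     sorted_tags = []
--     for tag_to_find in red_server_tags:
--         for i in range(0, len(tags)):
--             tag = tags[i]
--             if tag == tag_to_find:
--                 sorted_tags.append(tag)
--     return sorted_tags
-- ===== SOURCE B (Python) =====
-- red_server_tags = ["Scam Server", "Impersonator Server", "Fake Vouch Server", "Fake Event Server"]
--
-- def sort_server_tags(tags):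
--     # one pass: count occurrences of each red tag, then reconstruct grouped output
--     counts = {t: 0 for t in red_server_tags}
--     for tag in tags:
--         if tag in red_server_tags:
--             counts[tag] += 1
--     out = []
--     for t in red_server_tags:
--         out.extend([t] * counts[t])
--     return out
-- ===== Notes on version B (the rewrite author's own statement) =====
-- stated objective: simpler
-- what changed: Replaces the nested rescan-the-whole-list-once-per-red-tag loops with a single counting pass over tags followed by reconstructing each red tag's group by repetition.
import Mathlib
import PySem

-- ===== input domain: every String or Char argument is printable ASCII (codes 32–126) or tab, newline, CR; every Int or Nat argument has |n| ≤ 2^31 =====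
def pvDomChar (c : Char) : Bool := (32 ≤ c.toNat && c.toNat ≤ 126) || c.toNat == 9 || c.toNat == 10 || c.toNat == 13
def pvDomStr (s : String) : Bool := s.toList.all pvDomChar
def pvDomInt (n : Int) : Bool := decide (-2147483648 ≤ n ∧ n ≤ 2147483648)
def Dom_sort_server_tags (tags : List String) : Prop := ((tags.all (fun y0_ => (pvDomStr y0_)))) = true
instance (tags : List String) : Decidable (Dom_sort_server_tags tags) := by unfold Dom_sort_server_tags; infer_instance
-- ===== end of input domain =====

-- B replaces A's nested per-red-tag rescans of the whole list with one counting pass plus reconstruction (simpler).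

def redServerTags : List String :=
  ["Scam Server", "Impersonator Server", "Fake Vouch Server", "Fake Event Server"]

-- ===== PORT A =====
def sort_server_tags (tags : List String) : List String :=
  redServerTags.foldl (fun sorted_tags tag_to_find =>
    (PySem.List.pyRange 0 (PySem.List.len tags) 1).foldl (fun acc i =>
      let tag := PySem.List.pyGetD tags i ""   -- i is always in range, so the default is never used
      if tag == tag_to_find then acc ++ [tag] else acc) sorted_tags) []

-- ===== PORT B =====
def sort_server_tags_alt (tags : List String) : List String :=
  let counts0 : PySem.Dict String Int :=
    redServerTags.foldl (fun d t => d.insert t 0) PySem.Dict.empty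
  let counts : PySem.Dict String Int :=
    tags.foldl (fun d tag => if redServerTags.contains tag then d.modify tag 0 (· + 1) else d) counts0
  redServerTags.foldl (fun out t => out ++ List.replicate (counts.getD t 0).toNat t) []

-- ===== PRECONDITION & SPEC =====
def Spec_sort_server_tags (tags : List String) (out : List String) : Prop := out = sort_server_tags_alt tags
instance (tags : List String) (out : List String) : Decidable (Spec_sort_server_tags tags out) := by unfold Spec_sort_server_tags; infer_instance

-- ===== CLAIM =====
def Claim_equal_sort_server_tags : Prop := ∀ (tags : List String), Dom_sort_server_tags tags → Spec_sort_server_tags tags (sort_server_tags tags)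

-- ===== LEMMAS AND PROOFS =====

-- B's count table reads back the exact multiplicity of each red tag in `tags`.
theorem counts_getD (tags : List String) (t : String) (ht : t ∈ redServerTags) :
    ((tags.foldl (fun d tag => if redServerTags.contains tag then d.modify tag 0 (· + 1) else d)
        (redServerTags.foldl (fun d t => d.insert t 0)
          (PySem.Dict.empty : PySem.Dict String Int))).getD t 0)
      = (tags.count t : Int) := by
  rw [PySem.List.foldl_if_eq_foldl_filter, PySem.Dict.getD_foldl_modify_add_one]
  have h0 : ((redServerTags.foldl (fun d t => d.insert t 0)
      (PySem.Dict.empty : PySem.Dict String Int)).getD t 0) = 0 := by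
    fin_cases ht <;> decide
  rw [h0, List.count_filter (by simpa using ht)]
  simp

-- A's inner index loop over `tags` appends exactly `count t tags` copies of t.
theorem inner_loop_eq (tags : List String) (t : String) (acc : List String) :
    (PySem.List.pyRange 0 (PySem.List.len tags) 1).foldl (fun acc i =>
        let tag := PySem.List.pyGetD tags i ""
        if tag == t then acc ++ [tag] else acc) acc
      = acc ++ List.replicate (tags.count t) t := by
  show (PySem.List.pyRange 0 (PySem.List.len tags) 1).foldl (fun acc i =>
        if PySem.List.pyGetD tags i "" == t then acc ++ [PySem.List.pyGetD tags i ""] else acc) acc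
      = acc ++ List.replicate (tags.count t) t
  simp only [PySem.List.len_eq]
  rw [PySem.List.foldl_pyRange_zero_pyGetD' tags ""
        (fun acc tag => if tag == t then acc ++ [tag] else acc) acc,
      PySem.List.foldl_append_if_eq_filter, List.filter_beq]

-- ===== VERDICT =====
theorem sort_server_tags_spec : Claim_equal_sort_server_tags := by
  intro tags _
  unfold Spec_sort_server_tags sort_server_tags sort_server_tags_alt
  show _ = redServerTags.foldl (fun out t => out ++ List.replicate
      (((tags.foldl (fun d tag => if redServerTags.contains tag then d.modify tag 0 (· + 1) else d)
          (redServerTags.foldl (fun d t => d.insert t 0)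
            (PySem.Dict.empty : PySem.Dict String Int))).getD t 0)).toNat t) []
  have hA : ∀ (red : List String) (acc : List String), (∀ t ∈ red, t ∈ redServerTags) →
      red.foldl (fun sorted_tags tag_to_find =>
        (PySem.List.pyRange 0 (PySem.List.len tags) 1).foldl (fun acc i =>
          let tag := PySem.List.pyGetD tags i ""
          if tag == tag_to_find then acc ++ [tag] else acc) sorted_tags) acc
      = red.foldl (fun out t => out ++ List.replicate
          (((tags.foldl (fun d tag => if redServerTags.contains tag then d.modify tag 0 (· + 1) else d)
              (redServerTags.foldl (fun d t => d.insert t 0)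
                (PySem.Dict.empty : PySem.Dict String Int))).getD t 0)).toNat t) acc := by
    intro red
    induction red with
    | nil => intro acc _; rfl
    | cons t rest ih =>
      intro acc hmem
      simp only [List.foldl_cons]
      rw [inner_loop_eq, counts_getD tags t (hmem t List.mem_cons_self)]
      simp only [Int.toNat_natCast]
      exact ih _ (fun x hx => hmem x (List.mem_cons_of_mem _ hx))
  exact hA redServerTags [] (fun t ht => ht)
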